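-- pv_equiv track=rewrite | github.com/adrianmcphee/simpleisadvanced-public-site | generate-chapters.py | words_to_paragraphs
-- ===== SOURCE A (Python) =====
-- def words_to_paragraphs(words, max_paragraphs=3):
--     """Convert word array to list of paragraph strings."""
--     paragraphs = []
--     current = []
--     in_heading = False
--
--     for obj in words:
--         w = obj.get("w", "")
--         p = obj.get("p", "")
--
--         if p == "heading":
--             # If we've accumulated words, flush them
--             if current:
--                 text = " ".join(current).strip()
--                 if text:
--                     paragraphs.append(text)
--                 current = []
--                 if len(paragraphs) >= max_paragraphs:
--                     break
--             in_heading = True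
--             continue
--
--         in_heading = False
--         current.append(w)
--
--         if p == "paragraph":
--             text = " ".join(current).strip()
--             if text:
--                 paragraphs.append(text)
--             current = []
--             if len(paragraphs) >= max_paragraphs:
--                 break
--
--     if current and len(paragraphs) < max_paragraphs:
--         text = " ".join(current).strip()
--         if text:
--             paragraphs.append(text)
--
--     return paragraphs[:max_paragraphs]
-- ===== SOURCE B (Python) =====
-- def words_to_paragraphs(words, max_paragraphs=3):
--     """Convert word array to list of paragraph strings."""
--     # Phase 1: segmentation only — split the word stream into segments of word strings.
--     segs = []
--     cur = []
--     for obj in words: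
--         p = obj.get("p", "")
--         if p == "heading":
--             segs.append(cur)
--             cur = []
--         else:
--             cur.append(obj.get("w", ""))
--             if p == "paragraph":
--                 segs.append(cur)
--                 cur = []
--     segs.append(cur)
--     # Phase 2: text building.
--     texts = [" ".join(seg).strip() for seg in segs]
--     # Phase 3: keep the first max_paragraphs non-empty texts.
--     out = []
--     for t in texts:
--         if len(out) >= max_paragraphs:
--             break
--         if t:
--             out.append(t)
--     return out
-- ===== Notes on version B (the rewrite author's own statement) =====
-- stated objective: alternative
-- what changed: B replaces A's single loop that interleaves accumulation, flushing, limit-breaking and a trailing flush with three separate phases: segment the word stream, map each segment to a joined-and-stripped text, then collect the first max_paragraphs non-empty texts.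
import Mathlib
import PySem

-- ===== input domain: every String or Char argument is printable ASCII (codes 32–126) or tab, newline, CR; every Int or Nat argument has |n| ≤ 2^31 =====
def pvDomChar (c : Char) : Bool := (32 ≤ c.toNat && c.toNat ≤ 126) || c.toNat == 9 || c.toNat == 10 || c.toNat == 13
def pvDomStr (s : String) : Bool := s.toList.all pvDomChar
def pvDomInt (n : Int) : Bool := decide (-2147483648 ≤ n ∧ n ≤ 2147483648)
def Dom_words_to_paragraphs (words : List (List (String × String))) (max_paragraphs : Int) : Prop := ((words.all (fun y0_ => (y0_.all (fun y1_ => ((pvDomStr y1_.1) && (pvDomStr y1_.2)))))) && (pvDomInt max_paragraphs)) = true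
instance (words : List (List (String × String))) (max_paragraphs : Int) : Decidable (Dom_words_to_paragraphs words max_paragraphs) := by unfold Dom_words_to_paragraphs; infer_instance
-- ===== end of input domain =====

-- B separates the work into three phases (segment, build texts, take first non-empty up to the
-- limit) instead of A's interleaved accumulate-and-flush loop; objective: simpler decomposition.

-- ===== PORT A =====
-- A's loop: accumulates `current`, flushes on "heading"/"paragraph" markers, breaks once
-- len(paragraphs) >= max_paragraphs (the break always leaves current == [], so it is modelled by
-- returning early with an empty current).  A's `in_heading` flag is dead state (written, never
-- read) and is omitted.
def wtpA_loop (max_paragraphs : Int) : List (List (String × String)) → List String → List String → List String × List String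
  | [], pars, cur => (pars, cur)
  | obj :: rest, pars, cur =>
    let w := (PySem.Dict.mk obj).getD "w" ""
    let p := (PySem.Dict.mk obj).getD "p" ""
    if p = "heading" then
      if cur ≠ [] then
        let text := PySem.Str.strip (PySem.Str.join " " cur)
        let pars' := if text ≠ "" then pars ++ [text] else pars
        if max_paragraphs ≤ (pars'.length : Int) then (pars', [])   -- break
        else wtpA_loop max_paragraphs rest pars' []
      else wtpA_loop max_paragraphs rest pars cur
    else
      let cur' := cur ++ [w]
      if p = "paragraph" then
        let text := PySem.Str.strip (PySem.Str.join " " cur')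
        let pars' := if text ≠ "" then pars ++ [text] else pars
        if max_paragraphs ≤ (pars'.length : Int) then (pars', [])   -- break
        else wtpA_loop max_paragraphs rest pars' []
      else wtpA_loop max_paragraphs rest pars cur'

-- the code after A's loop: the trailing flush, then `paragraphs[:max_paragraphs]`
def wtpA_finish (max_paragraphs : Int) (pc : List String × List String) : List String :=
  let pars :=
    if pc.2 ≠ [] ∧ (pc.1.length : Int) < max_paragraphs then
      let text := PySem.Str.strip (PySem.Str.join " " pc.2)
      if text ≠ "" then pc.1 ++ [text] else pc.1
    else pc.1
  PySem.List.slice pars none (some max_paragraphs)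

def words_to_paragraphs (words : List (List (String × String))) (max_paragraphs : Int) : List String :=
  wtpA_finish max_paragraphs (wtpA_loop max_paragraphs words [] [])

-- ===== PORT B =====
-- Phase 1: split the word stream into segments of word strings (heading word dropped,
-- paragraph word kept and closes the segment).
def wtpB_segs : List (List (String × String)) → List String → List (List String)
  | [], cur => [cur]
  | obj :: rest, cur =>
    let p := (PySem.Dict.mk obj).getD "p" ""
    if p = "heading" then cur :: wtpB_segs rest []
    else
      let cur' := cur ++ [(PySem.Dict.mk obj).getD "w" ""]
      if p = "paragraph" then cur' :: wtpB_segs rest []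
      else wtpB_segs rest cur'

-- Phase 3: keep the first max_paragraphs non-empty texts.
def wtpB_collect (max_paragraphs : Int) : List String → List String → List String
  | [], out => out
  | t :: ts, out =>
    if max_paragraphs ≤ (out.length : Int) then out   -- break
    else if t ≠ "" then wtpB_collect max_paragraphs ts (out ++ [t])
    else wtpB_collect max_paragraphs ts out

def words_to_paragraphs_alt (words : List (List (String × String))) (max_paragraphs : Int) : List String :=
  let texts := (wtpB_segs words []).map (fun seg => PySem.Str.strip (PySem.Str.join " " seg))
  wtpB_collect max_paragraphs texts []

-- ===== PRECONDITION & SPEC =====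
def Spec_words_to_paragraphs (words : List (List (String × String))) (max_paragraphs : Int) (out : List String) : Prop := out = words_to_paragraphs_alt words max_paragraphs
instance (words : List (List (String × String))) (max_paragraphs : Int) (out : List String) : Decidable (Spec_words_to_paragraphs words max_paragraphs out) := by unfold Spec_words_to_paragraphs; infer_instance

-- ===== CLAIM (what is proved, stated in full; the proofs are below) =====
def Claim_equal_words_to_paragraphs : Prop := ∀ (words : List (List (String × String))) (max_paragraphs : Int), Dom_words_to_paragraphs words max_paragraphs → Spec_words_to_paragraphs words max_paragraphs (words_to_paragraphs words max_paragraphs)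

-- ===== LEMMAS AND PROOFS =====

lemma wtp_txt_nil : PySem.Str.strip (PySem.Str.join " " []) = "" := by decide

-- once the output is full, the collecting loop returns it unchanged
lemma wtpB_collect_stop (m : Int) (L out : List String) (h : m ≤ (out.length : Int)) :
    wtpB_collect m L out = out := by
  cases L with
  | nil => simp [wtpB_collect]
  | cons t ts => simp [wtpB_collect, h]

lemma wtp_slice_id (m : Int) (l : List String) (h : (l.length : Int) ≤ m) :
    PySem.List.slice l none (some m) = l := by
  rw [PySem.List.slice_to l (by omega)]
  exact List.take_of_length_le (by omega)

lemma wtp_slice_nil (m : Int) (hm : m ≤ 0) (l : List String) (hl : l.length ≤ 1) :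
    PySem.List.slice l none (some m) = [] := by
  rcases eq_or_lt_of_le hm with h0 | hneg
  · rw [h0, PySem.List.slice_to l le_rfl]
    simp
  · have hk : m = -(((-m).toNat : Nat) : Int) := by omega
    rw [hk, PySem.List.slice_to_neg_natCast l _ (by omega)]
    have h0 : l.length - (-m).toNat = 0 := by omega
    simp [h0]

-- Main invariant: as long as the output is not full, A's loop followed by A's epilogue computes
-- exactly B's limited collection of the segment texts of the remaining input.
lemma wtp_main (m : Int) (rest : List (List (String × String))) :
    ∀ (cur pars : List String), (pars.length : Int) < m →
      wtpA_finish m (wtpA_loop m rest pars cur) =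
        wtpB_collect m ((wtpB_segs rest cur).map (fun seg => PySem.Str.strip (PySem.Str.join " " seg))) pars := by
  induction rest with
  | nil =>
    intro cur pars hlt
    have hnl : ¬ m ≤ (pars.length : Int) := not_le.mpr hlt
    by_cases hc : cur = []
    · subst hc
      simp [wtpA_loop, wtpB_segs, wtpA_finish, wtpB_collect, wtp_txt_nil, hnl, hlt]
      exact wtp_slice_id m pars (le_of_lt hlt)
    · by_cases ht : PySem.Str.strip (PySem.Str.join " " cur) = ""
      · simp [wtpA_loop, wtpB_segs, wtpA_finish, wtpB_collect, ht, hnl, hlt, hc]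
        exact wtp_slice_id m pars (le_of_lt hlt)
      · simp [wtpA_loop, wtpB_segs, wtpA_finish, wtpB_collect, ht, hnl, hlt, hc]
        exact wtp_slice_id m _ (by simp; omega)
  | cons obj rest ih =>
    intro cur pars hlt
    have hnl : ¬ m ≤ (pars.length : Int) := not_le.mpr hlt
    simp only [wtpA_loop, wtpB_segs]
    by_cases hp : (PySem.Dict.mk obj).getD "p" "" = "heading"
    · rw [if_pos hp, if_pos hp, List.map_cons, wtpB_collect, if_neg hnl]
      by_cases hc : cur = []
      · subst hc
        rw [if_neg (by simp), if_neg (by simp [wtp_txt_nil])]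
        exact ih [] pars hlt
      · rw [if_pos hc]
        by_cases ht : PySem.Str.strip (PySem.Str.join " " cur) = ""
        · rw [if_neg (by simp [ht]; exact hlt), if_neg (by simp [ht]), if_neg (by simp [ht])]
          exact ih [] pars hlt
        · rw [if_pos ht, if_pos ht]
          have hlen : (((pars ++ [PySem.Str.strip (PySem.Str.join " " cur)]).length : Nat) : Int)
              = (pars.length : Int) + 1 := by simp
          by_cases hfull : m ≤ (pars.length : Int) + 1
          · rw [if_pos (by rw [hlen]; exact hfull)]
            rw [wtpB_collect_stop m _ _ (by rw [hlen]; exact hfull)]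
            simp only [wtpA_finish, ne_eq, not_true_eq_false, false_and, if_false]
            exact wtp_slice_id m _ (by rw [hlen]; omega)
          · rw [if_neg (by rw [hlen]; exact hfull)]
            exact ih [] _ (by rw [hlen]; omega)
    · rw [if_neg hp, if_neg hp]
      by_cases hq : (PySem.Dict.mk obj).getD "p" "" = "paragraph"
      · rw [if_pos hq, if_pos hq, List.map_cons, wtpB_collect, if_neg hnl]
        by_cases ht : PySem.Str.strip (PySem.Str.join " " (cur ++ [(PySem.Dict.mk obj).getD "w" ""])) = ""
        · rw [if_neg (by simp [ht]; exact hlt), if_neg (by simp [ht]), if_neg (by simp [ht])]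
          exact ih [] pars hlt
        · rw [if_pos ht, if_pos ht]
          have hlen : (((pars ++ [PySem.Str.strip (PySem.Str.join " " (cur ++ [(PySem.Dict.mk obj).getD "w" ""]))]).length : Nat) : Int)
              = (pars.length : Int) + 1 := by simp
          by_cases hfull : m ≤ (pars.length : Int) + 1
          · rw [if_pos (by rw [hlen]; exact hfull)]
            rw [wtpB_collect_stop m _ _ (by rw [hlen]; exact hfull)]
            simp only [wtpA_finish, ne_eq, not_true_eq_false, false_and, if_false]
            exact wtp_slice_id m _ (by rw [hlen]; omega)
          · rw [if_neg (by rw [hlen]; exact hfull)]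
            exact ih [] _ (by rw [hlen]; omega)
      · rw [if_neg hq, if_neg hq]
        exact ih _ pars hlt

-- with a non-positive limit A's loop (started with no paragraphs) ends with at most one
-- paragraph, and with an empty current if it flushed at all
lemma wtpA_loop_nonpos (m : Int) (hm : m ≤ 0) (rest : List (List (String × String))) :
    ∀ cur, (wtpA_loop m rest [] cur).1 = [] ∨
      ((wtpA_loop m rest [] cur).1.length = 1 ∧ (wtpA_loop m rest [] cur).2 = []) := by
  induction rest with
  | nil => intro cur; left; simp [wtpA_loop]
  | cons obj rest ih =>
    intro cur
    simp only [wtpA_loop]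
    by_cases hp : (PySem.Dict.mk obj).getD "p" "" = "heading"
    · rw [if_pos hp]
      by_cases hc : cur = []
      · rw [if_neg (by simp [hc])]
        exact ih cur
      · rw [if_pos hc]
        by_cases ht : PySem.Str.strip (PySem.Str.join " " cur) = ""
        · rw [if_pos (by simp [ht]; omega)]
          simp [ht]
        · rw [if_pos (by simp [ht]; omega)]
          simp [ht]
    · rw [if_neg hp]
      by_cases hq : (PySem.Dict.mk obj).getD "p" "" = "paragraph"
      · rw [if_pos hq]
        by_cases ht : PySem.Str.strip (PySem.Str.join " " (cur ++ [(PySem.Dict.mk obj).getD "w" ""])) = ""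
        · rw [if_pos (by simp [ht]; omega)]
          simp [ht]
        · rw [if_pos (by simp [ht]; omega)]
          simp [ht]
      · rw [if_neg hq]
        exact ih _

-- ===== VERDICT (by name: the statement is the Claim_ definition above) =====
theorem words_to_paragraphs_spec : Claim_equal_words_to_paragraphs := by
  intro words m _
  unfold Spec_words_to_paragraphs words_to_paragraphs words_to_paragraphs_alt
  by_cases hm : 0 < m
  · exact wtp_main m words [] [] (by simpa using hm)
  · rw [not_lt] at hm
    rw [wtpB_collect_stop m _ [] (by simpa using hm)]
    rcases wtpA_loop_nonpos m hm words [] with h | ⟨h1, h2⟩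
    · simp only [wtpA_finish, h]
      rw [if_neg (by rintro ⟨-, hbad⟩; simp at hbad; omega)]
      exact wtp_slice_nil m hm [] (by simp)
    · simp only [wtpA_finish, h2, ne_eq, not_true_eq_false, false_and, if_false]
      exact wtp_slice_nil m hm _ (by omega)
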